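-- pv_equiv track=rewrite | github.com/mshen1019/Hermes | hermes/llm_helper.py | _match_to_option
-- ===== SOURCE A (Python) =====
-- from typing import List, Optional, TYPE_CHECKING
--
-- def _match_to_option(answer: str, options: List[str]) -> str:
--     """Try to match the LLM's answer to one of the available options."""
--     answer_lower = answer.lower().strip()
--
--     # Exact match
--     for opt in options:
--         if opt.lower().strip() == answer_lower:
--             return opt
--
--     # Starts with match (e.g., "No" matches "No, I do not...")
--     for opt in options:
--         opt_lower = opt.lower().strip()
--         if opt_lower.startswith(answer_lower) or answer_lower.startswith(opt_lower):
--             return opt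
--
--     # Contains match
--     for opt in options:
--         if answer_lower in opt.lower() or opt.lower() in answer_lower:
--             return opt
--
--     # No match found, return original answer
--     return answer
-- ===== SOURCE B (Python) =====
-- def _match_to_option(answer, options):
--     """Single pass with precedence levels (1=exact, 2=prefix, 3=contains):
--     keep the first option achieving the smallest level, testing only the
--     levels that could still improve on the best seen so far."""
--     answer_lower = answer.lower().strip()
--     best_opt, best_level = answer, 4
--     for opt in options:
--         opt_lower = opt.lower().strip()
--         if opt_lower == answer_lower:
--             return opt  # exact match beats everything; first one wins
--         if best_level > 2 and (opt_lower.startswith(answer_lower)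
--                                or answer_lower.startswith(opt_lower)):
--             best_opt, best_level = opt, 2
--         elif best_level > 3 and (answer_lower in opt.lower()
--                                  or opt.lower() in answer_lower):
--             best_opt, best_level = opt, 3
--     return best_opt
-- ===== Notes on version B (the rewrite author's own statement) =====
-- stated objective: alternative
-- what changed: Replaces A's three sequential scans (exact, then prefix, then contains) by a single pass that keeps the first option with the smallest precedence level, testing each level only while it could still improve the best seen.
import Mathlib
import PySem

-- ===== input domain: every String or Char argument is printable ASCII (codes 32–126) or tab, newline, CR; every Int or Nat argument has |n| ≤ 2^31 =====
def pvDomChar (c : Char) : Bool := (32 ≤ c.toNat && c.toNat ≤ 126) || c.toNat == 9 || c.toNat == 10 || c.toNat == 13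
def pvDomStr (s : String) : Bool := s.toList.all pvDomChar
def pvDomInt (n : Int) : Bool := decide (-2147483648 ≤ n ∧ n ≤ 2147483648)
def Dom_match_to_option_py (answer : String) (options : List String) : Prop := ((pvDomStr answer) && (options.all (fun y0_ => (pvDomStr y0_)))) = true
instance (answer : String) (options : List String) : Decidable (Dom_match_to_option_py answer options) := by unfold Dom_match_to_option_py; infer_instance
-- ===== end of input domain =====

-- B replaces A's three sequential scans by a single pass that scores each option
-- with a precedence level (1=exact, 2=prefix, 3=contains, 4=none) and keeps the
-- first option achieving the smallest level (alternative decomposition, same cost).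


-- ===== PORT A =====
-- predicates of A's three loops (shared helpers; `al` is answer.lower().strip())
-- opt.lower().strip() == answer_lower
def pvExact (al opt : String) : Bool := PySem.Str.strip (PySem.Str.lower opt) == al
-- opt_lower.startswith(answer_lower) or answer_lower.startswith(opt_lower), opt_lower stripped
def pvPrefix (al opt : String) : Bool :=
  PySem.Str.startswith (PySem.Str.strip (PySem.Str.lower opt)) al ||
  PySem.Str.startswith al (PySem.Str.strip (PySem.Str.lower opt))
-- answer_lower in opt.lower() or opt.lower() in answer_lower (NO strip here, as in A)
def pvContains (al opt : String) : Bool :=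
  PySem.Str.isIn al (PySem.Str.lower opt) || PySem.Str.isIn (PySem.Str.lower opt) al

def match_to_option_py (answer : String) (options : List String) : String :=
  let al := PySem.Str.strip (PySem.Str.lower answer)
  match options.find? (pvExact al) with
  | some opt => opt
  | none =>
    match options.find? (pvPrefix al) with
    | some opt => opt
    | none =>
      match options.find? (pvContains al) with
      | some opt => opt
      | none => answer

-- ===== PORT B =====
-- Source B's loop: one pass keeping (best_opt, best_level); exact returns at once,
-- and each level is tested only while it could still improve best_level
def pvLoop (al : String) : List String → String × Nat → String
  | [], acc => acc.1
  | o :: rest, acc =>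
    if pvExact al o then o
    else if 2 < acc.2 && pvPrefix al o then pvLoop al rest (o, 2)
    else if 3 < acc.2 && pvContains al o then pvLoop al rest (o, 3)
    else pvLoop al rest acc

def match_to_option_py_alt (answer : String) (options : List String) : String :=
  let al := PySem.Str.strip (PySem.Str.lower answer)
  pvLoop al options (answer, 4)

-- ===== PRECONDITION & SPEC =====
def Spec_match_to_option_py (answer : String) (options : List String) (out : String) : Prop := out = match_to_option_py_alt answer options
instance (answer : String) (options : List String) (out : String) : Decidable (Spec_match_to_option_py answer options out) := by unfold Spec_match_to_option_py; infer_instance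

-- ===== CLAIM (what is proved, stated in full; the proofs are below) =====
def Claim_equal_match_to_option_py : Prop := ∀ (answer : String) (options : List String), Dom_match_to_option_py answer options → Spec_match_to_option_py answer options (match_to_option_py answer options)

-- ===== LEMMAS AND PROOFS =====

-- best_level 2: only a later exact match can replace b
lemma pvLoop_two (al : String) (opts : List String) (b : String) :
    pvLoop al opts (b, 2) = (opts.find? (pvExact al)).getD b := by
  induction opts generalizing b with
  | nil => rfl
  | cons o rest ih =>
    by_cases h1 : pvExact al o = true
    · simp [pvLoop, h1]
    · have h1' : pvExact al o = false := by simpa using h1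
      simp [pvLoop, h1', ih]

-- best_level 3: first exact, else first prefix, else b
lemma pvLoop_three (al : String) (opts : List String) (b : String) :
    pvLoop al opts (b, 3) =
      (match opts.find? (pvExact al) with
       | some o => o
       | none => (opts.find? (pvPrefix al)).getD b) := by
  induction opts generalizing b with
  | nil => rfl
  | cons o rest ih =>
    by_cases h1 : pvExact al o = true
    · simp [pvLoop, h1]
    · have h1' : pvExact al o = false := by simpa using h1
      by_cases h2 : pvPrefix al o = true
      · simp only [pvLoop, h1', Bool.false_eq_true, if_false, h2,
          show ((2:Nat) < 3 : Bool) = true from rfl, Bool.true_and, if_true, pvLoop_two]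
        simp [h1', h2]
        cases rest.find? (pvExact al) <;> simp
      · have h2' : pvPrefix al o = false := by simpa using h2
        simp [pvLoop, h1', h2', ih]

-- the initial state (best_level 4): exactly A's three-scan cascade
lemma pvLoop_four (al : String) (opts : List String) (b : String) :
    pvLoop al opts (b, 4) =
      (match opts.find? (pvExact al) with
       | some o => o
       | none =>
         match opts.find? (pvPrefix al) with
         | some o => o
         | none => (opts.find? (pvContains al)).getD b) := by
  induction opts generalizing b with
  | nil => rfl
  | cons o rest ih =>
    by_cases h1 : pvExact al o = true
    · simp [pvLoop, h1]
    · have h1' : pvExact al o = false := by simpa using h1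
      by_cases h2 : pvPrefix al o = true
      · simp only [pvLoop, h1', Bool.false_eq_true, if_false, h2,
          show ((2:Nat) < 4 : Bool) = true from rfl, Bool.true_and, if_true, pvLoop_two]
        simp [h1', h2]
        cases rest.find? (pvExact al) <;> simp
      · have h2' : pvPrefix al o = false := by simpa using h2
        by_cases h3 : pvContains al o = true
        · simp only [pvLoop, h1', h2', Bool.false_eq_true, if_false, h3,
            show ((3:Nat) < 4 : Bool) = true from rfl, Bool.true_and, Bool.and_false,
            if_true, pvLoop_three]
          simp [h1', h2', h3]
          cases rest.find? (pvExact al) <;> cases rest.find? (pvPrefix al) <;> simp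
        · have h3' : pvContains al o = false := by simpa using h3
          simp [pvLoop, h1', h2', h3', ih]

-- ===== VERDICT (by name: the statement is the Claim_ definition above) =====
theorem match_to_option_py_spec : Claim_equal_match_to_option_py := by
  intro answer options _
  unfold Spec_match_to_option_py match_to_option_py match_to_option_py_alt
  show (match options.find? (pvExact (PySem.Str.strip (PySem.Str.lower answer))) with
        | some opt => opt
        | none =>
          match options.find? (pvPrefix (PySem.Str.strip (PySem.Str.lower answer))) with
          | some opt => opt
          | none =>
            match options.find? (pvContains (PySem.Str.strip (PySem.Str.lower answer))) with
            | some opt => opt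
            | none => answer) =
      pvLoop (PySem.Str.strip (PySem.Str.lower answer)) options (answer, 4)
  rw [pvLoop_four]
  cases options.find? (pvExact (PySem.Str.strip (PySem.Str.lower answer))) <;>
    cases options.find? (pvPrefix (PySem.Str.strip (PySem.Str.lower answer))) <;>
    cases options.find? (pvContains (PySem.Str.strip (PySem.Str.lower answer))) <;> simp
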